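-- pv_equiv track=rewrite | github.com/riccardodibella/purification-scheduling | main.py | check_feasible_schedule
-- ===== SOURCE A (Python) =====
-- def check_feasible_schedule(choices: list[tuple[int, int]]) -> bool:
--     # we don't check that all the choices are made within the length of the list
--     # we just check that choices don't overlap, and therefore that no pair of choices have a qubit in common
--
--     count_dict = {}
--     for two_qubits_choice in choices:
--         for qubit_index in two_qubits_choice:
--             count_dict[qubit_index] = count_dict.get(qubit_index, 0) + 1
--
--     for k in count_dict.keys():
--         if count_dict[k] > 1:
--             return False
--     return True
-- ===== SOURCE B (Python) =====
-- def check_feasible_schedule(choices: list[tuple[int, int]]) -> bool: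
--     seen = set()
--     for two_qubits_choice in choices:
--         for qubit_index in two_qubits_choice:
--             if qubit_index in seen:
--                 return False
--             seen.add(qubit_index)
--     return True
-- ===== Notes on version B (the rewrite author's own statement) =====
-- stated objective: simpler
-- what changed: Replaces the two-pass count-dictionary-then-scan with a single pass over a membership set that returns False at the first repeated qubit.
import Mathlib
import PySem

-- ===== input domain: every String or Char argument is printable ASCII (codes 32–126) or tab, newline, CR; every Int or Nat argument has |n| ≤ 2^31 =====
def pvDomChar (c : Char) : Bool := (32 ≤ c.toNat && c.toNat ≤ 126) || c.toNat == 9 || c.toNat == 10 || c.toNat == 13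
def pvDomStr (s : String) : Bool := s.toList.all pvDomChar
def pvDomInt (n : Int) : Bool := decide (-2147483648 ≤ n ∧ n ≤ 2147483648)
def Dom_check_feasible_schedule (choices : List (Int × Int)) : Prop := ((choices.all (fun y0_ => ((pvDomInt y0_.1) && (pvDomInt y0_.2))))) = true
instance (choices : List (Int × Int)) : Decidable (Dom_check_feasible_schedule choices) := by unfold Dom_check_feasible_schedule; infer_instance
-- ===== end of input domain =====

-- B replaces A's count-dictionary + scan-of-keys with a single pass over a membership
-- set that returns False at the first repeated qubit (simpler decomposition, same cost).

-- ===== PORT A =====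
-- the final loop 'for k in count_dict.keys(): if count_dict[k] > 1: return False' (early return)
def pvCheckKeys (d : PySem.Dict Int Int) : List Int → Bool
  | [] => true
  | k :: rest => if d.getD k 0 > 1 then false else pvCheckKeys d rest

def check_feasible_schedule (choices : List (Int × Int)) : Bool :=
  let count_dict : PySem.Dict Int Int :=
    choices.foldl
      (fun d two_qubits_choice =>
        [two_qubits_choice.1, two_qubits_choice.2].foldl
          (fun d qubit_index => d.insert qubit_index (d.getD qubit_index 0 + 1)) d)
      PySem.Dict.empty
  pvCheckKeys count_dict count_dict.keys

-- ===== PORT B =====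
def pvAltGo (seen : PySem.Set Int) : List (Int × Int) → Bool
  | [] => true
  | (a, b) :: rest =>
    if PySem.Set.contains seen a then false
    else
      let seen1 := PySem.Set.add seen a
      if PySem.Set.contains seen1 b then false
      else pvAltGo (PySem.Set.add seen1 b) rest

def check_feasible_schedule_alt (choices : List (Int × Int)) : Bool :=
  pvAltGo PySem.Set.empty choices

-- ===== PRECONDITION & SPEC =====
def Spec_check_feasible_schedule (choices : List (Int × Int)) (out : Bool) : Prop := out = check_feasible_schedule_alt choices
instance (choices : List (Int × Int)) (out : Bool) : Decidable (Spec_check_feasible_schedule choices out) := by unfold Spec_check_feasible_schedule; infer_instance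

-- ===== CLAIM (what is proved, stated in full; the proofs are below) =====
def Claim_equal_check_feasible_schedule : Prop := ∀ (choices : List (Int × Int)), Dom_check_feasible_schedule choices → Spec_check_feasible_schedule choices (check_feasible_schedule choices)

-- ===== LEMMAS AND PROOFS =====

-- the flattened list of qubits, in A's and B's common iteration order
def pvFlat (choices : List (Int × Int)) : List Int :=
  choices.flatMap (fun p => [p.1, p.2])

theorem pvFlat_cons (p : Int × Int) (l : List (Int × Int)) :
    pvFlat (p :: l) = p.1 :: p.2 :: pvFlat l := by
  simp [pvFlat]

-- A's nested counting fold equals the flat counting fold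
theorem pvFoldA_eq (l : List (Int × Int)) (d : PySem.Dict Int Int) :
    l.foldl
      (fun d p => [p.1, p.2].foldl
        (fun d q => d.insert q (d.getD q 0 + 1)) d) d
    = (pvFlat l).foldl (fun d q => d.insert q (d.getD q 0 + 1)) d := by
  induction l generalizing d with
  | nil => simp [pvFlat]
  | cons p rest ih =>
    rw [pvFlat_cons]
    simp only [List.foldl]
    exact ih _

-- A's second loop is an all-check over the keys
theorem pvCheckKeys_eq (d : PySem.Dict Int Int) (L : List Int) :
    pvCheckKeys d L = decide (∀ k ∈ L, d.getD k 0 ≤ 1) := by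
  induction L with
  | nil => simp [pvCheckKeys]
  | cons k rest ih =>
    simp only [pvCheckKeys, ih]
    by_cases h : d.getD k 0 > 1 <;> simp [h] <;> omega

-- A computes "no qubit occurs twice in the flattened list"
theorem pvA_eq_nodup (choices : List (Int × Int)) :
    check_feasible_schedule choices = decide (pvFlat choices).Nodup := by
  unfold check_feasible_schedule
  rw [pvFoldA_eq, PySem.Dict.foldl_insert_getD_add_one_eq_counter, pvCheckKeys_eq,
    decide_eq_decide, List.nodup_iff_count_le_one]
  constructor
  · intro h v
    by_cases hv : v ∈ pvFlat choices
    · have := h v (by rw [PySem.Dict.keys_counter, PySem.Set.mem_ofList]; exact hv)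
      rw [PySem.Dict.getD_counter] at this
      omega
    · simp [List.count_eq_zero_of_not_mem hv]
  · intro h k _
    rw [PySem.Dict.getD_counter]
    have := h k
    omega

-- B's loop invariant: with a duplicate-free 'seen', the loop decides nodup of seen ++ rest
theorem pvAltGo_eq (l : List (Int × Int)) (seen : List Int) (hnd : seen.Nodup) :
    pvAltGo seen l = decide (seen ++ pvFlat l).Nodup := by
  induction l generalizing seen with
  | nil => simp [pvAltGo, pvFlat, hnd]
  | cons p rest ih =>
    obtain ⟨a, b⟩ := p
    rw [pvFlat_cons]
    by_cases ha : a ∈ seen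
    · have hno : ¬ (seen ++ a :: b :: pvFlat rest).Nodup := by
        intro h
        rcases List.nodup_append.mp h with ⟨-, -, hd⟩
        exact hd a ha a (by simp) rfl
      simp [pvAltGo, PySem.Set.contains, ha, hno]
    · have hadd : PySem.Set.add seen a = seen ++ [a] := by
        simp [PySem.Set.add, PySem.Set.contains, ha]
      by_cases hb : b ∈ seen ∨ b = a
      · have hbmem : b ∈ seen ++ [a] := by
          rcases hb with h | h <;> simp [h]
        have hno : ¬ (seen ++ a :: b :: pvFlat rest).Nodup := by
          intro h
          rcases List.nodup_append.mp h with ⟨-, h2, hd⟩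
          rcases hb with h' | h'
          · exact hd b h' b (by simp) rfl
          · subst h'
            simp [List.nodup_cons] at h2
        simp [pvAltGo, PySem.Set.contains, ha, hbmem, hno]
      · rw [not_or] at hb
        have hbmem : b ∉ seen ++ [a] := by simp [hb.1, hb.2]
        have hadd2 : PySem.Set.add (seen ++ [a]) b = seen ++ [a] ++ [b] := by
          simp [PySem.Set.add, PySem.Set.contains, hbmem]
        have hnd2 : (seen ++ [a] ++ [b]).Nodup := by
          rw [List.append_assoc, List.nodup_append]
          refine ⟨hnd, by simp [Ne.symm hb.2], ?_⟩
          intro x hx y hy e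
          subst e
          simp at hy
          rcases hy with h | h
          · exact ha (h ▸ hx)
          · exact hb.1 (h ▸ hx)
        simp only [pvAltGo, PySem.Set.contains, hadd,
          List.contains_eq_mem, decide_eq_false ha, Bool.false_eq_true, if_false,
          decide_eq_false hbmem, hadd2]
        rw [ih _ hnd2]
        simp only [List.append_assoc, List.cons_append, List.nil_append]

theorem pvB_eq_nodup (choices : List (Int × Int)) :
    check_feasible_schedule_alt choices = decide (pvFlat choices).Nodup := by
  have h := pvAltGo_eq choices [] List.nodup_nil
  simp only [List.nil_append] at h
  exact h

-- ===== VERDICT (by name: the statement is the Claim_ definition above) =====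
theorem check_feasible_schedule_spec : Claim_equal_check_feasible_schedule := by
  intro choices _
  unfold Spec_check_feasible_schedule
  rw [pvA_eq_nodup, pvB_eq_nodup]
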